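-- pv_equiv track=rewrite | github.com/silentJET85/speakandspell | speakandspell.py | convert_code
-- ===== SOURCE A (Python) =====
-- def convert_code(code):
-- 	letters_a_to_c = ("A", "B", "C")
-- 	letters_f_to_d = ("F", "E", "D")
-- 	letters_g_to_p = ("G", "H", "I", "J", "K", "L", "M", "N", "O", "P")
-- 	letters_z_to_q = ("Z", "Y", "X", "W", "V", "U", "T", "S", "R", "Q")
-- 	new_text = ""
--
-- 	for letter in code:
-- 		if letter in letters_a_to_c:
-- 			letter_index = letters_a_to_c.index(letter)
-- 			new_letter = letters_f_to_d[letter_index]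
-- 			new_text += new_letter
-- 		elif letter in letters_f_to_d:
-- 			letter_index = letters_f_to_d.index(letter)
-- 			new_letter = letters_a_to_c[letter_index]
-- 			new_text += new_letter
-- 		elif letter in letters_g_to_p:
-- 			letter_index = letters_g_to_p.index(letter)
-- 			new_letter = letters_z_to_q[letter_index]
-- 			new_text += new_letter
-- 		elif letter in letters_z_to_q:
-- 			letter_index = letters_z_to_q.index(letter)
-- 			new_letter = letters_g_to_p[letter_index]
-- 			new_text += new_letter
-- 		elif letter == "'":
-- 			new_text += "'"
-- 	return new_text
-- ===== SOURCE B (Python) =====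
-- def convert_code(code):
--     out = []
--     for c in code:
--         if 'A' <= c <= 'F':
--             out.append(chr(135 - ord(c)))
--         elif 'G' <= c <= 'Z':
--             out.append(chr(161 - ord(c)))
--         elif c == "'":
--             out.append(c)
--     return ''.join(out)
-- ===== Notes on version B (the rewrite author's own statement) =====
-- stated objective: simpler
-- what changed: Replaces the four lookup tuples and the per-hit tuple.index scans with a closed-form arithmetic reflection (chr(135-ord(c)) for A-F, chr(161-ord(c)) for G-Z) gated by range comparisons, collecting output in a list joined once instead of repeated string concatenation.
import Mathlib
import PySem

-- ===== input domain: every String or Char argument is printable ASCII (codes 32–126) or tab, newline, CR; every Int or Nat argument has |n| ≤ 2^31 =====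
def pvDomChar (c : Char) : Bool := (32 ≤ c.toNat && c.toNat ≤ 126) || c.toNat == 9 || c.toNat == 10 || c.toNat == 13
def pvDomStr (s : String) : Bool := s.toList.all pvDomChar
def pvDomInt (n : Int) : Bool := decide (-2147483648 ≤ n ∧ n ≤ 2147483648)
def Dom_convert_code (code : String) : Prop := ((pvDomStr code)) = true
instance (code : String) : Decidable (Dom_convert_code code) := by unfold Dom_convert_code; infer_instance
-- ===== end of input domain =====

-- B replaces A's four lookup tuples + .index scans with a closed-form arithmetic reflection; simpler, same result.

-- ===== PORT A =====
-- the four tuples of A (iterating a Python str yields 1-char strings, modelled as Char)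
def ccLettersAtoC : List Char := ['A', 'B', 'C']
def ccLettersFtoD : List Char := ['F', 'E', 'D']
def ccLettersGtoP : List Char := ['G', 'H', 'I', 'J', 'K', 'L', 'M', 'N', 'O', 'P']
def ccLettersZtoQ : List Char := ['Z', 'Y', 'X', 'W', 'V', 'U', 'T', 'S', 'R', 'Q']

-- one iteration of A's loop body: membership test, tuple.index, lookup in the paired tuple
def ccStepA (newText : String) (letter : Char) : String :=
  if letter ∈ ccLettersAtoC then
    match (PySem.List.index? ccLettersAtoC letter).bind (fun i => PySem.List.pyGet? ccLettersFtoD (i : Int)) with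
    | some newLetter => newText.push newLetter
    | none => newText
  else if letter ∈ ccLettersFtoD then
    match (PySem.List.index? ccLettersFtoD letter).bind (fun i => PySem.List.pyGet? ccLettersAtoC (i : Int)) with
    | some newLetter => newText.push newLetter
    | none => newText
  else if letter ∈ ccLettersGtoP then
    match (PySem.List.index? ccLettersGtoP letter).bind (fun i => PySem.List.pyGet? ccLettersZtoQ (i : Int)) with
    | some newLetter => newText.push newLetter
    | none => newText
  else if letter ∈ ccLettersZtoQ then
    match (PySem.List.index? ccLettersZtoQ letter).bind (fun i => PySem.List.pyGet? ccLettersGtoP (i : Int)) with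
    | some newLetter => newText.push newLetter
    | none => newText
  else if letter = '\'' then newText.push '\''
  else newText

def convert_code (code : String) : String :=
  code.toList.foldl ccStepA ""

-- ===== PORT B =====
-- closed-form reflection for one character: Some mapped char, or none (dropped)
def ccReflect (c : Char) : Option Char :=
  if 'A' ≤ c ∧ c ≤ 'F' then some (Char.ofNat (135 - c.toNat))
  else if 'G' ≤ c ∧ c ≤ 'Z' then some (Char.ofNat (161 - c.toNat))
  else if c = '\'' then some c
  else none

def convert_code_alt (code : String) : String :=
  String.ofList (code.toList.filterMap ccReflect)

-- ===== PRECONDITION & SPEC =====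
def Spec_convert_code (code : String) (out : String) : Prop := out = convert_code_alt code
instance (code : String) (out : String) : Decidable (Spec_convert_code code out) := by unfold Spec_convert_code; infer_instance

-- ===== CLAIM (what is proved, stated in full; the proofs are below) =====
def Claim_equal_convert_code : Prop := ∀ (code : String), Dom_convert_code code → Spec_convert_code code (convert_code code)

-- ===== LEMMAS AND PROOFS =====

theorem ccStrExt {s t : String} (h : s.toList = t.toList) : s = t := by
  have := congrArg String.ofList h; simpa using this

theorem ccCharLe (a b : Char) : a ≤ b ↔ a.toNat ≤ b.toNat := by
  simp [Char.le_def, UInt32.le_iff_toNat_le]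

theorem ccCharEq {c : Char} {n : Nat} (h : c.toNat = n) : c = Char.ofNat n := by
  rw [← h, Char.ofNat_toNat]

-- one step of A's loop equals appending B's reflected character
theorem ccStepA_eq (nt : String) (c : Char) :
    ccStepA nt c = nt ++ String.ofList (ccReflect c).toList := by
  by_cases h1 : c ∈ ccLettersAtoC
  · rcases (by simpa [ccLettersAtoC] using h1 : c = 'A' ∨ c = 'B' ∨ c = 'C') with rfl | rfl | rfl <;>
      (apply ccStrExt;
       simp [ccStepA, ccReflect, ccLettersAtoC, ccLettersFtoD,
             PySem.List.index?, PySem.List.pyGet?, PySem.List.pyIdx?, List.idxOf?,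
             List.findIdx?_cons, Option.bind])
  by_cases h2 : c ∈ ccLettersFtoD
  · rcases (by simpa [ccLettersFtoD] using h2 : c = 'F' ∨ c = 'E' ∨ c = 'D') with rfl | rfl | rfl <;>
      (apply ccStrExt;
       simp [ccStepA, ccReflect, ccLettersAtoC, ccLettersFtoD,
             PySem.List.index?, PySem.List.pyGet?, PySem.List.pyIdx?, List.idxOf?,
             List.findIdx?_cons, Option.bind])
  by_cases h3 : c ∈ ccLettersGtoP
  · rcases (by simpa [ccLettersGtoP] using h3 :
        c = 'G' ∨ c = 'H' ∨ c = 'I' ∨ c = 'J' ∨ c = 'K' ∨ c = 'L' ∨ c = 'M' ∨ c = 'N' ∨ c = 'O' ∨ c = 'P')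
      with rfl | rfl | rfl | rfl | rfl | rfl | rfl | rfl | rfl | rfl <;>
      (apply ccStrExt;
       simp [ccStepA, ccReflect, ccLettersAtoC, ccLettersFtoD, ccLettersGtoP, ccLettersZtoQ,
             PySem.List.index?, PySem.List.pyGet?, PySem.List.pyIdx?, List.idxOf?,
             List.findIdx?_cons, Option.bind])
  by_cases h4 : c ∈ ccLettersZtoQ
  · rcases (by simpa [ccLettersZtoQ] using h4 :
        c = 'Z' ∨ c = 'Y' ∨ c = 'X' ∨ c = 'W' ∨ c = 'V' ∨ c = 'U' ∨ c = 'T' ∨ c = 'S' ∨ c = 'R' ∨ c = 'Q')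
      with rfl | rfl | rfl | rfl | rfl | rfl | rfl | rfl | rfl | rfl <;>
      (apply ccStrExt;
       simp [ccStepA, ccReflect, ccLettersAtoC, ccLettersFtoD, ccLettersGtoP, ccLettersZtoQ,
             PySem.List.index?, PySem.List.pyGet?, PySem.List.pyIdx?, List.idxOf?,
             List.findIdx?_cons, Option.bind])
  by_cases h5 : c = '\''
  · subst h5
    apply ccStrExt
    simp [ccStepA, ccReflect, ccLettersAtoC, ccLettersFtoD, ccLettersGtoP, ccLettersZtoQ]
  -- c matches no branch: both sides leave nt unchanged
  have hr : ccReflect c = none := by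
    unfold ccReflect
    split_ifs with hA hG
    · exfalso
      have ha : (65 : Nat) ≤ c.toNat := (ccCharLe 'A' c).mp hA.1
      have hb : c.toNat ≤ 70 := (ccCharLe c 'F').mp hA.2
      have : c.toNat = 65 ∨ c.toNat = 66 ∨ c.toNat = 67 ∨ c.toNat = 68 ∨ c.toNat = 69 ∨ c.toNat = 70 := by omega
      rcases this with h | h | h | h | h | h <;> rw [ccCharEq h] at h1 h2 <;>
        simp [ccLettersAtoC, ccLettersFtoD] at h1 h2
    · exfalso
      have ha : (71 : Nat) ≤ c.toNat := (ccCharLe 'G' c).mp hG.1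
      have hb : c.toNat ≤ 90 := (ccCharLe c 'Z').mp hG.2
      have : c.toNat = 71 ∨ c.toNat = 72 ∨ c.toNat = 73 ∨ c.toNat = 74 ∨ c.toNat = 75 ∨
          c.toNat = 76 ∨ c.toNat = 77 ∨ c.toNat = 78 ∨ c.toNat = 79 ∨ c.toNat = 80 ∨
          c.toNat = 81 ∨ c.toNat = 82 ∨ c.toNat = 83 ∨ c.toNat = 84 ∨ c.toNat = 85 ∨
          c.toNat = 86 ∨ c.toNat = 87 ∨ c.toNat = 88 ∨ c.toNat = 89 ∨ c.toNat = 90 := by omega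
      rcases this with h | h | h | h | h | h | h | h | h | h | h | h | h | h | h | h | h | h | h | h <;>
        rw [ccCharEq h] at h3 h4 <;> simp [ccLettersGtoP, ccLettersZtoQ] at h3 h4
    · rfl
  have hl : ccStepA nt c = nt := by
    unfold ccStepA
    rw [if_neg h1, if_neg h2, if_neg h3, if_neg h4, if_neg h5]
  rw [hl, hr]
  apply ccStrExt; simp

theorem ccFold_eq (l : List Char) (nt : String) :
    l.foldl ccStepA nt = String.ofList (nt.toList ++ l.filterMap ccReflect) := by
  induction l generalizing nt with
  | nil => simp
  | cons c l ih =>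
    simp only [List.foldl_cons, ih, ccStepA_eq, List.filterMap_cons]
    cases ccReflect c <;> simp

-- ===== VERDICT (by name: the statement is the Claim_ definition above) =====
theorem convert_code_spec : Claim_equal_convert_code := by
  intro code _
  unfold Spec_convert_code convert_code convert_code_alt
  rw [ccFold_eq]
  simp
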